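-- pv_equiv track=rewrite | github.com/openthinklabs/Tangent | tangent_code/tangent/ranking/ranking_functions.py | matched_edges_from_locations
-- ===== SOURCE A (Python) =====
-- def matched_edges_from_locations(locations):
--     if len(locations) > 0:
--         min_len = None
--         max_len = None
--         full_locations = {}
--         for loc in locations:
--             current_len = len(loc)
--
--             if min_len is None or current_len < min_len:
--                 min_len = current_len
--             if max_len is None or current_len > max_len:
--                 max_len = current_len
--
--             if current_len in full_locations:
--                 full_locations[current_len].append(loc)
--             else:
--                 full_locations[current_len] = [loc]
--
--         total_edges = 0
--         current_len = max_len
--         while current_len > min_len: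
--             # check ...
--             if (current_len in full_locations) and ((current_len - 1) in full_locations):
--                 # only do test if parents might appear
--                 for loc in full_locations[current_len]:
--                     prefix = loc[:-1]
--
--                     if prefix in full_locations[current_len - 1]:
--                         total_edges += 1
--
--             current_len -= 1
--
--         return total_edges
--     else:
--         return 0
-- ===== SOURCE B (Python) =====
-- def matched_edges_from_locations(locations):
--     present = {tuple(loc) for loc in locations}
--     return sum(1 for loc in locations
--                if len(loc) > 0 and tuple(loc[:-1]) in present)
-- ===== Notes on version B (the rewrite author's own statement) =====
-- stated objective: simpler
-- what changed: Replaces A's min/max tracking, dict grouping locations by length and descending while-loop over length levels with one flat pass counting locations whose parent prefix (loc[:-1]) lies in a single precomputed membership set of all locations.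
import Mathlib
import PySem

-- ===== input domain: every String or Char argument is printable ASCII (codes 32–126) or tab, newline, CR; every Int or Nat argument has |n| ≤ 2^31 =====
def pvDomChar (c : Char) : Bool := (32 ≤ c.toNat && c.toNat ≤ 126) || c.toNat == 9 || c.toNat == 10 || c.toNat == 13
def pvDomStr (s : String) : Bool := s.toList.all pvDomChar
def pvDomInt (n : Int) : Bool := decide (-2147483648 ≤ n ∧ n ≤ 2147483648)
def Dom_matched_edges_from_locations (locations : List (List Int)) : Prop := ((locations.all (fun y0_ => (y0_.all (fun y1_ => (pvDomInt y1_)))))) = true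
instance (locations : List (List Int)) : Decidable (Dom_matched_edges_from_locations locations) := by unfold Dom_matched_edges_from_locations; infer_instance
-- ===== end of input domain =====

-- B replaces A's min/max tracking, group-by-length dict and descending level loop by one
-- flat scan counting locations whose parent prefix is in a global membership set (simpler).

-- ===== PORT A =====
-- one iteration of A's first loop: update min_len, max_len and full_locations[len(loc)]
def pvStepA (st : Option Int × Option Int × PySem.Dict Int (List (List Int)))
    (loc : List Int) : Option Int × Option Int × PySem.Dict Int (List (List Int)) :=
  let minl := st.1
  let maxl := st.2.1
  let fl := st.2.2
  let cl : Int := loc.length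
  let minl' := match minl with
    | none => some cl
    | some m => if cl < m then some cl else some m
  let maxl' := match maxl with
    | none => some cl
    | some M => if M < cl then some cl else some M
  let fl' := if fl.contains cl then fl.modify cl [] (· ++ [loc]) else fl.insert cl [loc]
  (minl', maxl', fl')

def pvBuildA (locations : List (List Int)) :
    Option Int × Option Int × PySem.Dict Int (List (List Int)) :=
  locations.foldl pvStepA (none, none, PySem.Dict.empty)

-- the inner 'for loc in full_locations[current_len]' loop (loc[:-1] is dropLast, exact)
def pvInnerA (group parents : List (List Int)) (total : Int) : Int :=
  group.foldl (fun t loc => if loc.dropLast ∈ parents then t + 1 else t) total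

-- the 'while current_len > min_len' loop
def pvWhileA (fl : PySem.Dict Int (List (List Int))) (minl cur total : Int) : Int :=
  if h : minl < cur then
    let total' := if fl.contains cur ∧ fl.contains (cur - 1) then
        pvInnerA (fl.getD cur []) (fl.getD (cur - 1) []) total
      else total
    pvWhileA fl minl (cur - 1) total'
  else total
termination_by (cur - minl).toNat
decreasing_by omega

def matched_edges_from_locations (locations : List (List Int)) : Int :=
  if locations.length > 0 then
    match pvBuildA locations with
    | (some m, some M, fl) => pvWhileA fl m M 0
    | _ => 0   -- unreachable: min_len/max_len are set by the first iteration of a nonempty loop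
  else 0

-- ===== PORT B =====
def matched_edges_from_locations_alt (locations : List (List Int)) : Int :=
  let present : PySem.Set (List Int) := PySem.Set.ofList locations
  locations.foldl
    (fun acc loc => if loc.length > 0 ∧ loc.dropLast ∈ present then acc + 1 else acc) 0

-- ===== PRECONDITION & SPEC =====
def Spec_matched_edges_from_locations (locations : List (List Int)) (out : Int) : Prop := out = matched_edges_from_locations_alt locations
instance (locations : List (List Int)) (out : Int) : Decidable (Spec_matched_edges_from_locations locations out) := by unfold Spec_matched_edges_from_locations; infer_instance

-- ===== CLAIM (what is proved, stated in full; the proofs are below) =====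
def Claim_equal_matched_edges_from_locations : Prop := ∀ (locations : List (List Int)), Dom_matched_edges_from_locations locations → Spec_matched_edges_from_locations locations (matched_edges_from_locations locations)

-- ===== LEMMAS AND PROOFS =====

-- the predicate both programs count: a non-root location whose parent prefix is present
def pvEdge (locations : List (List Int)) (loc : List Int) : Bool :=
  decide (0 < loc.length ∧ loc.dropLast ∈ locations)

lemma pvAlt_eq_countP (locations : List (List Int)) :
    matched_edges_from_locations_alt locations =
      (locations.countP (pvEdge locations) : Int) := by
  unfold matched_edges_from_locations_alt
  show List.foldl (fun acc loc =>
      if loc.length > 0 ∧ loc.dropLast ∈ PySem.Set.ofList locations then acc + 1 else acc)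
    0 locations = _
  have hf : (fun (acc : Int) (loc : List Int) =>
      if loc.length > 0 ∧ loc.dropLast ∈ PySem.Set.ofList locations then acc + 1 else acc)
    = fun acc loc => if pvEdge locations loc = true then acc + 1 else acc := by
    funext acc loc
    simp [pvEdge, PySem.Set.mem_ofList]
  rw [hf, PySem.List.foldl_count_if]
  ring

-- disjoint split of a countP
lemma countP_or_disjoint {α : Type} (l : List α) (p q : α → Bool)
    (h : ∀ x ∈ l, ¬(p x = true ∧ q x = true)) :
    l.countP (fun x => p x || q x) = l.countP p + l.countP q := by
  induction l with
  | nil => simp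
  | cons a l ih =>
    have ha := h a (by simp)
    have hl : ∀ x ∈ l, ¬(p x = true ∧ q x = true) := fun x hx => h x (by simp [hx])
    by_cases hp : p a
    · have hq : q a = false := by
        by_contra hq'
        exact ha ⟨hp, by simpa using hq'⟩
      simp [hp, hq, ih hl]
      omega
    · by_cases hq : q a <;> simp [hp, hq, ih hl] <;> omega

-- dict component of the grouping fold: getD and contains, generalized over the start state
lemma pvFoldA_getD (l : List (List Int)) :
    ∀ (st : Option Int × Option Int × PySem.Dict Int (List (List Int))) (L : Int),
      (l.foldl pvStepA st).2.2.getD L []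
        = st.2.2.getD L [] ++ l.filter (fun loc => decide ((loc.length : Int) = L)) := by
  induction l with
  | nil => intro st L; simp
  | cons loc l ih =>
    intro st L
    rw [List.foldl_cons, ih]
    have hstep : (pvStepA st loc).2.2.getD L []
        = st.2.2.getD L [] ++ (if (loc.length : Int) = L then [loc] else []) := by
      simp only [pvStepA]
      by_cases hc : st.2.2.contains (loc.length : Int)
      · rw [if_pos hc, PySem.Dict.getD_modify]
        by_cases hL : L = (loc.length : Int)
        · simp [hL]
        · simp [hL, Ne.symm hL]
      · rw [if_neg hc, PySem.Dict.getD_insert]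
        by_cases hL : L = (loc.length : Int)
        · subst hL
          rw [if_pos rfl, PySem.Dict.getD_of_not_contains st.2.2 [] (eq_false_of_ne_true hc)]
          simp
        · simp [hL, Ne.symm hL]
    rw [hstep]
    by_cases hL : (loc.length : Int) = L <;> simp [hL]

lemma pvFoldA_contains (l : List (List Int)) :
    ∀ (st : Option Int × Option Int × PySem.Dict Int (List (List Int))) (L : Int),
      (l.foldl pvStepA st).2.2.contains L
        = (st.2.2.contains L || l.any (fun loc => decide ((loc.length : Int) = L))) := by
  induction l with
  | nil => intro st L; simp
  | cons loc l ih =>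
    intro st L
    rw [List.foldl_cons, ih]
    have hstep : (pvStepA st loc).2.2.contains L
        = (st.2.2.contains L || decide ((loc.length : Int) = L)) := by
      simp only [pvStepA]
      by_cases hc : st.2.2.contains (loc.length : Int)
      · rw [if_pos hc, PySem.Dict.contains_modify]
        by_cases hL : L = (loc.length : Int)
        · subst hL; simp [hc]
        · simp [hL, Ne.symm hL]
      · rw [if_neg hc, PySem.Dict.contains_insert]
        by_cases hL : L = (loc.length : Int)
        · subst hL; simp
        · simp [hL, Ne.symm hL]
    rw [hstep]
    cases h1 : st.2.2.contains L <;>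
      cases h2 : decide ((loc.length : Int) = L) <;> simp [h2]

-- min component: the result is nonnegative (lengths are) and bounds every length from below
lemma pvFoldA_min_nonneg (l : List (List Int)) :
    ∀ (st : Option Int × Option Int × PySem.Dict Int (List (List Int))),
      (∀ m0, st.1 = some m0 → 0 ≤ m0) →
      ∀ m, (l.foldl pvStepA st).1 = some m → 0 ≤ m := by
  induction l with
  | nil => intro st h m hm; exact h m hm
  | cons loc l ih =>
    intro st h m hm
    refine ih (pvStepA st loc) ?_ m hm
    intro m0 h0
    simp only [pvStepA] at h0
    cases hst : st.1 with
    | none => rw [hst] at h0; simp at h0; omega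
    | some m1 =>
      rw [hst] at h0
      have h1 : 0 ≤ m1 := h m1 hst
      by_cases hlt : (loc.length : Int) < m1 <;> simp [hlt] at h0 <;> omega

lemma pvFoldA_min_le (l : List (List Int)) :
    ∀ (st : Option Int × Option Int × PySem.Dict Int (List (List Int))) (m : Int),
      (l.foldl pvStepA st).1 = some m →
      (∀ m0, st.1 = some m0 → m ≤ m0) ∧ ∀ loc ∈ l, m ≤ (loc.length : Int) := by
  induction l with
  | nil =>
    intro st m hm
    refine ⟨?_, by simp⟩
    intro m0 h0
    simp only [List.foldl_nil] at hm
    rw [hm] at h0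
    cases h0
    exact le_refl m
  | cons loc l ih =>
    intro st m hm
    obtain ⟨h1, h2⟩ := ih (pvStepA st loc) m hm
    have hstep : ∀ v, (pvStepA st loc).1 = some v →
        v ≤ (loc.length : Int) ∧ ∀ m0, st.1 = some m0 → v ≤ m0 := by
      intro v hv
      simp only [pvStepA] at hv
      cases hst : st.1 with
      | none => rw [hst] at hv; simp at hv; exact ⟨le_of_eq hv.symm, by simp⟩
      | some m1 =>
        rw [hst] at hv
        by_cases hlt : (loc.length : Int) < m1 <;> simp [hlt] at hv <;>
          exact ⟨by omega, by intro m0 h0; injection h0 with h0; omega⟩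
    constructor
    · intro m0 h0
      cases hv : (pvStepA st loc).1 with
      | none =>
        exfalso
        simp only [pvStepA] at hv
        cases hst : st.1 <;> rw [hst] at hv <;> simp at hv
        split at hv <;> simp at hv
      | some v =>
        have := (hstep v hv).2 m0 h0
        have := h1 v hv
        omega
    · intro loc' hl'
      rcases List.mem_cons.mp hl' with heq | hl'
      · rw [heq]
        cases hv : (pvStepA st loc).1 with
        | none =>
          exfalso
          simp only [pvStepA] at hv
          cases hst : st.1 <;> rw [hst] at hv <;> simp at hv
          split at hv <;> simp at hv
        | some v =>
          have := (hstep v hv).1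
          have := h1 v hv
          omega
      · exact h2 loc' hl'

-- max component: the result bounds every length from above
lemma pvFoldA_max_ge (l : List (List Int)) :
    ∀ (st : Option Int × Option Int × PySem.Dict Int (List (List Int))) (M : Int),
      (l.foldl pvStepA st).2.1 = some M →
      (∀ M0, st.2.1 = some M0 → M0 ≤ M) ∧ ∀ loc ∈ l, (loc.length : Int) ≤ M := by
  induction l with
  | nil =>
    intro st M hM
    refine ⟨?_, by simp⟩
    intro M0 h0
    simp only [List.foldl_nil] at hM
    rw [hM] at h0
    cases h0
    exact le_refl M
  | cons loc l ih =>
    intro st M hM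
    obtain ⟨h1, h2⟩ := ih (pvStepA st loc) M hM
    have hstep : ∀ v, (pvStepA st loc).2.1 = some v →
        (loc.length : Int) ≤ v ∧ ∀ M0, st.2.1 = some M0 → M0 ≤ v := by
      intro v hv
      simp only [pvStepA] at hv
      cases hst : st.2.1 with
      | none => rw [hst] at hv; simp at hv; exact ⟨le_of_eq hv, by simp⟩
      | some M1 =>
        rw [hst] at hv
        by_cases hlt : M1 < (loc.length : Int) <;> simp [hlt] at hv <;>
          exact ⟨by omega, by intro M0 h0; injection h0 with h0; omega⟩
    have hsome : ∃ v, (pvStepA st loc).2.1 = some v := by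
      simp only [pvStepA]
      cases hst : st.2.1 with
      | none => exact ⟨_, rfl⟩
      | some M1 => by_cases hlt : M1 < (loc.length : Int) <;> simp [hlt]
    obtain ⟨v, hv⟩ := hsome
    constructor
    · intro M0 h0
      have := (hstep v hv).2 M0 h0
      have := h1 v hv
      omega
    · intro loc' hl'
      rcases List.mem_cons.mp hl' with heq | hl'
      · rw [heq]
        have := (hstep v hv).1
        have := h1 v hv
        omega
      · exact h2 loc' hl'

-- both trackers are set once the list is nonempty
lemma pvFoldA_isSome (l : List (List Int)) :
    ∀ (st : Option Int × Option Int × PySem.Dict Int (List (List Int))),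
      st.1.isSome → st.2.1.isSome →
      (l.foldl pvStepA st).1.isSome ∧ (l.foldl pvStepA st).2.1.isSome := by
  induction l with
  | nil => intro st h1 h2; exact ⟨h1, h2⟩
  | cons loc l ih =>
    intro st h1 h2
    refine ih (pvStepA st loc) ?_ ?_ <;> simp only [pvStepA] <;>
      [cases hst : st.1; cases hst : st.2.1] <;> simp <;> split <;> simp

lemma pvBuildA_isSome (locations : List (List Int)) (h : locations ≠ []) :
    (pvBuildA locations).1.isSome ∧ (pvBuildA locations).2.1.isSome := by
  cases locations with
  | nil => exact absurd rfl h
  | cons loc l =>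
    unfold pvBuildA
    rw [List.foldl_cons]
    refine pvFoldA_isSome l _ ?_ ?_ <;> simp [pvStepA]

-- the inner loop is a count
lemma pvInnerA_eq (group parents : List (List Int)) (total : Int) :
    pvInnerA group parents total
      = total + (group.countP (fun loc => decide (loc.dropLast ∈ parents)) : Int) := by
  unfold pvInnerA
  have hf : (fun (t : Int) (loc : List Int) => if loc.dropLast ∈ parents then t + 1 else t)
      = fun t loc => if (fun loc => decide (loc.dropLast ∈ parents)) loc = true then t + 1 else t := by
    funext t loc; simp
  rw [hf, PySem.List.foldl_count_if]

-- the while loop counts, level by level, the edges with child length in (minl, cur]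
lemma pvWhileA_spec (locations : List (List Int)) (fl : PySem.Dict Int (List (List Int)))
    (hg : ∀ L : Int, fl.getD L [] = locations.filter (fun loc => decide ((loc.length : Int) = L)))
    (hc : ∀ L : Int, fl.contains L = locations.any (fun loc => decide ((loc.length : Int) = L)))
    (m : Int) (hm0 : 0 ≤ m) :
    ∀ cur total, m ≤ cur →
      pvWhileA fl m cur total
        = total + (locations.countP
            (fun loc => decide (m < (loc.length : Int) ∧ (loc.length : Int) ≤ cur
              ∧ loc.dropLast ∈ locations)) : Int) := by
  have key : ∀ n : Nat, ∀ cur total, m ≤ cur → (cur - m).toNat = n →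
      pvWhileA fl m cur total
        = total + (locations.countP
            (fun loc => decide (m < (loc.length : Int) ∧ (loc.length : Int) ≤ cur
              ∧ loc.dropLast ∈ locations)) : Int) := by
    intro n
    induction n with
    | zero =>
      intro cur total hmc h0
      have hce : cur = m := by omega
      subst hce
      rw [pvWhileA, dif_neg (lt_irrefl cur)]
      have : locations.countP
          (fun loc => decide (cur < (loc.length : Int) ∧ (loc.length : Int) ≤ cur
            ∧ loc.dropLast ∈ locations)) = 0 := by
        rw [List.countP_eq_zero]
        intro loc _
        simp only [decide_eq_true_eq]
        rintro ⟨h1, h2, -⟩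
        omega
      rw [this]
      simp
    | succ n ih =>
      intro cur total hmc hn
      have hlt : m < cur := by omega
      rw [pvWhileA, dif_pos hlt]
      rw [ih (cur - 1) _ (by omega) (by omega)]
      have hlevel :
          (if fl.contains cur ∧ fl.contains (cur - 1) then
              pvInnerA (fl.getD cur []) (fl.getD (cur - 1) []) total
            else total)
          = total + (locations.countP
              (fun loc => decide ((loc.length : Int) = cur ∧ loc.dropLast ∈ locations)) : Int) := by
        by_cases hb : fl.contains cur ∧ fl.contains (cur - 1)
        · rw [if_pos hb, pvInnerA_eq, hg cur, List.countP_filter]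
          congr 2
          apply List.countP_congr
          intro loc hloc
          simp only [Bool.and_eq_true, decide_eq_true_eq]
          constructor
          · rintro ⟨hmem, hlen⟩
            rw [hg (cur - 1), List.mem_filter] at hmem
            exact ⟨hlen, hmem.1⟩
          · rintro ⟨hlen, hmem⟩
            refine ⟨?_, hlen⟩
            rw [hg (cur - 1), List.mem_filter]
            refine ⟨hmem, ?_⟩
            simp only [decide_eq_true_eq, List.length_dropLast]
            omega
        · rw [if_neg hb]
          have hz : locations.countP
              (fun loc => decide ((loc.length : Int) = cur ∧ loc.dropLast ∈ locations)) = 0 := by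
            rw [List.countP_eq_zero]
            intro loc hloc
            simp only [decide_eq_true_eq]
            rintro ⟨hlen, hmem⟩
            rcases not_and_or.mp hb with hb1 | hb1
            · have hany : locations.any (fun loc => decide ((loc.length : Int) = cur)) = false := by
                rw [← hc cur]; exact eq_false_of_ne_true hb1
              rw [List.any_eq_false] at hany
              exact hany loc hloc (by simpa using hlen)
            · have hany : locations.any (fun loc => decide ((loc.length : Int) = cur - 1)) = false := by
                rw [← hc (cur - 1)]; exact eq_false_of_ne_true hb1
              rw [List.any_eq_false] at hany
              refine hany loc.dropLast hmem ?_
              simp only [decide_eq_true_eq, List.length_dropLast]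
              omega
          rw [hz]
          simp
      rw [hlevel]
      have hsplit : locations.countP
            (fun loc => decide (m < (loc.length : Int) ∧ (loc.length : Int) ≤ cur
              ∧ loc.dropLast ∈ locations))
          = locations.countP
              (fun loc => decide ((loc.length : Int) = cur ∧ loc.dropLast ∈ locations))
            + locations.countP
              (fun loc => decide (m < (loc.length : Int) ∧ (loc.length : Int) ≤ cur - 1
                ∧ loc.dropLast ∈ locations)) := by
        rw [← countP_or_disjoint locations _ _ (by
          intro loc _
          simp only [decide_eq_true_eq]
          rintro ⟨⟨h1, -⟩, ⟨-, h2, -⟩⟩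
          omega)]
        apply List.countP_congr
        intro loc _
        simp only [Bool.or_eq_true, decide_eq_true_eq]
        constructor
        · rintro ⟨h1, h2, h3⟩
          by_cases hco : (loc.length : Int) = cur
          · exact Or.inl ⟨hco, h3⟩
          · exact Or.inr ⟨h1, by omega, h3⟩
        · rintro (⟨h1, h2⟩ | ⟨h1, h2, h3⟩)
          · exact ⟨by omega, by omega, h2⟩
          · exact ⟨h1, by omega, h3⟩
      rw [hsplit]
      push_cast
      ring
  intro cur total hmc
  exact key (cur - m).toNat cur total hmc rfl

-- ===== VERDICT (by name: the statement is the Claim_ definition above) =====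
theorem matched_edges_from_locations_spec : Claim_equal_matched_edges_from_locations := by
  intro locations _
  unfold Spec_matched_edges_from_locations
  rw [pvAlt_eq_countP]
  cases hne : locations with
  | nil => simp [matched_edges_from_locations]
  | cons loc0 rest =>
    rw [← hne]
    have hne' : locations ≠ [] := by rw [hne]; simp
    obtain ⟨h1, h2⟩ := pvBuildA_isSome locations hne'
    obtain ⟨m, hm⟩ := Option.isSome_iff_exists.mp h1
    obtain ⟨M, hM⟩ := Option.isSome_iff_exists.mp h2
    unfold matched_edges_from_locations
    rw [if_pos (by rw [hne]; simp)]
    have hbuild : pvBuildA locations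
        = (some m, some M, (pvBuildA locations).2.2) := by
      rw [← hm, ← hM]
    rw [hbuild]
    show pvWhileA (pvBuildA locations).2.2 m M 0 = _
    have hg := fun L => pvFoldA_getD locations (none, none, PySem.Dict.empty) L
    have hcC := fun L => pvFoldA_contains locations (none, none, PySem.Dict.empty) L
    have hmin := pvFoldA_min_le locations (none, none, PySem.Dict.empty) m hm
    have hmin0 := pvFoldA_min_nonneg locations (none, none, PySem.Dict.empty)
      (by intro m0 h0; simp at h0) m hm
    have hmax := pvFoldA_max_ge locations (none, none, PySem.Dict.empty) M hM
    have hloc0 : loc0 ∈ locations := by rw [hne]; simp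
    have hmM : m ≤ M := le_trans (hmin.2 loc0 hloc0) (hmax.2 loc0 hloc0)
    rw [pvWhileA_spec locations (pvBuildA locations).2.2
      (by intro L; have := hg L; simpa [pvBuildA] using this)
      (by intro L; have := hcC L; simpa [pvBuildA] using this)
      m hmin0 M 0 hmM]
    rw [zero_add]
    congr 1
    apply List.countP_congr
    intro loc hloc
    simp only [pvEdge, decide_eq_true_eq]
    constructor
    · rintro ⟨hlt, -, hmem⟩
      exact ⟨by omega, hmem⟩
    · rintro ⟨hpos, hmem⟩
      refine ⟨?_, hmax.2 loc hloc, hmem⟩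
      have := hmin.2 loc.dropLast hmem
      simp only [List.length_dropLast] at this
      omega
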